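-- pv_equiv track=rewrite | github.com/siran/writing | .scripts/render/pnpmd_book.py | _subtitle_segments
-- ===== SOURCE A (Python) =====
-- def _subtitle_segments(text: str) -> list[tuple[str, int]]:
--     """
--     Split subtitle into (line_text, blank_lines_before) tuples.
--     Leading/trailing newlines are ignored. Blank lines only add spacing before
--     subsequent text (never after the last line).
--     """
--     normalized = text.replace("\r\n", "\n").strip("\n")
--     if not normalized:
--         return []
--
--     segments: list[tuple[str, int]] = []
--     blank_run = 0
--     for ln in normalized.split("\n"):
--         stripped = ln.strip()
--         if stripped == "":
--             if segments:
--                 blank_run += 1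
--             continue
--         segments.append((stripped, blank_run))
--         blank_run = 0
--     return segments
-- ===== SOURCE B (Python) =====
-- def _subtitle_segments(text: str) -> list[tuple[str, int]]:
--     normalized = text.replace("\r\n", "\n").strip("\n")
--     if not normalized:
--         return []
--     stripped = [ln.strip() for ln in normalized.split("\n")]
--     nonblank = [(i, s) for i, s in enumerate(stripped) if s]
--     out = []
--     prev = None
--     for i, s in nonblank:
--         out.append((s, 0 if prev is None else i - prev - 1))
--         prev = i
--     return out
-- ===== Notes on version B (the rewrite author's own statement) =====
-- stated objective: alternative
-- what changed: B replaces A's per-line accumulator (segments list plus running blank counter with a reset and a 'segments nonempty' guard) by a two-phase pipeline: strip all lines, filter the enumerated non-blank ones, then derive each blank count arithmetically as the index gap to the previous non-blank line.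
import Mathlib
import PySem

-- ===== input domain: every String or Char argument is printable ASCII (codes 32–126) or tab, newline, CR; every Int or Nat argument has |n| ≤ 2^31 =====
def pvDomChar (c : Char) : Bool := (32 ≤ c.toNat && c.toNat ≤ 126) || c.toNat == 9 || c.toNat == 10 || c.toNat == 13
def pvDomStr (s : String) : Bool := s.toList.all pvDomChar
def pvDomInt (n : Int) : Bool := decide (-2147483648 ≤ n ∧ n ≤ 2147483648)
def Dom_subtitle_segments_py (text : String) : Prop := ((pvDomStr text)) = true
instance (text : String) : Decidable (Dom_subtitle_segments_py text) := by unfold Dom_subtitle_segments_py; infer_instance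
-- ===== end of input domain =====

-- B computes blank-line counts as index gaps between filtered non-blank lines instead of A's running counter with reset; alternative decomposition, same cost.

-- ===== PORT A =====
def subtitle_segments_py (text : String) : List (String × Int) :=
  let normalized := PySem.Str.stripChars (PySem.Str.replace text "\r\n" "\n") "\n"
  if normalized = "" then []
  else
    (((PySem.Str.split? normalized "\n").getD []).foldl
      (fun (st : List (String × Int) × Int) ln =>
        let stripped := PySem.Str.strip ln
        if stripped = "" then
          if st.1 ≠ [] then (st.1, st.2 + 1) else st
        else (st.1 ++ [(stripped, st.2)], 0))
      ([], 0)).1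

-- ===== PORT B =====
def subtitle_segments_py_alt (text : String) : List (String × Int) :=
  let normalized := PySem.Str.stripChars (PySem.Str.replace text "\r\n" "\n") "\n"
  if normalized = "" then []
  else
    let stripped := ((PySem.Str.split? normalized "\n").getD []).map PySem.Str.strip
    let nonblank := (PySem.List.enumerate stripped 0).filter (fun p => p.2 ≠ "")
    (nonblank.foldl
      (fun (st : List (String × Int) × Option Int) p =>
        (st.1 ++ [(p.2, match st.2 with | none => 0 | some prev => p.1 - prev - 1)], some p.1))
      ([], none)).1

-- ===== PRECONDITION & SPEC =====
def Spec_subtitle_segments_py (text : String) (out : List (String × Int)) : Prop := out = subtitle_segments_py_alt text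
instance (text : String) (out : List (String × Int)) : Decidable (Spec_subtitle_segments_py text out) := by unfold Spec_subtitle_segments_py; infer_instance

-- ===== CLAIM (what is proved, stated in full; the proofs are below) =====
def Claim_equal_subtitle_segments_py : Prop := ∀ (text : String), Dom_subtitle_segments_py text → Spec_subtitle_segments_py text (subtitle_segments_py text)

-- ===== LEMMAS AND PROOFS =====

-- Loop invariant: A's (segments, blank_run) state corresponds to B's (out, prev) state,
-- with blank_run = s - prev - 1 once a segment exists, and 0 before.
theorem pv_fold_eq (ls : List String) (s : Int) (acc : List (String × Int)) (r : Int)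
    (prev : Option Int)
    (h : match prev with
         | none => acc = [] ∧ r = 0
         | some p => acc ≠ [] ∧ r = s - p - 1) :
    (ls.foldl
      (fun (st : List (String × Int) × Int) ln =>
        let stripped := PySem.Str.strip ln
        if stripped = "" then
          if st.1 ≠ [] then (st.1, st.2 + 1) else st
        else (st.1 ++ [(stripped, st.2)], 0))
      (acc, r)).1 =
    (((PySem.List.enumerate (ls.map PySem.Str.strip) s).filter (fun p => p.2 ≠ "")).foldl
      (fun (st : List (String × Int) × Option Int) p =>
        (st.1 ++ [(p.2, match st.2 with | none => 0 | some prev => p.1 - prev - 1)], some p.1))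
      (acc, prev)).1 := by
  induction ls generalizing s acc r prev with
  | nil => simp [PySem.List.enumerate_nil]
  | cons l tl ih =>
    by_cases hb : PySem.Str.strip l = ""
    · cases prev with
      | none =>
        obtain ⟨ha, hr⟩ := h
        subst ha hr
        simpa [hb, PySem.List.enumerate_cons] using ih (s+1) [] 0 none (by simp)
      | some p =>
        obtain ⟨ha, hr⟩ := h
        simpa [hb, ha, PySem.List.enumerate_cons] using
          ih (s+1) acc (r+1) (some p) ⟨ha, by omega⟩
    · cases prev with
      | none =>
        obtain ⟨ha, hr⟩ := h
        subst hr
        simpa [hb, PySem.List.enumerate_cons] using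
          ih (s+1) (acc ++ [(PySem.Str.strip l, 0)]) 0 (some s) ⟨by simp, by omega⟩
      | some p =>
        obtain ⟨ha, hr⟩ := h
        have hr' : s - p - 1 = r := by omega
        simpa [hb, hr', PySem.List.enumerate_cons] using
          ih (s+1) (acc ++ [(PySem.Str.strip l, r)]) 0 (some s) ⟨by simp, by omega⟩

-- ===== VERDICT (by name: the statement is the Claim_ definition above) =====
theorem subtitle_segments_py_spec : Claim_equal_subtitle_segments_py := by
  intro text _
  unfold Spec_subtitle_segments_py subtitle_segments_py subtitle_segments_py_alt
  simp only []
  split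
  · rfl
  · exact pv_fold_eq _ 0 [] 0 none (by simp)
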